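-- pv_equiv track=rewrite | github.com/VaHiX/CodeForces | Python/ByTier/D/1965_D_Missing_Subarray_Sum.py | getSubSums
-- ===== SOURCE A (Python) =====
-- def getSubSums(odd, n):
--     palin = getPalin(odd, n)
--     sums = []
--     for i in range(n):
--         sum = 0
--         for j in range(i, n):
--             sum += palin[j]
--             sums.append(sum)
--     sums.sort(reverse=True)
--     return sums
--
-- def getPalin(odd, n):
--     pref = [(odd[i - 1] - odd[i]) // 2 for i in range(1, len(odd))]
--     return pref + [odd[-1] // (2 - (n & 1))] * (2 - (n & 1)) + pref[::-1]
-- ===== SOURCE B (Python) =====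
-- def getSubSums(odd, n):
--     # Build the palindrome from pairwise differences of odd.
--     diffs = [(a - b) // 2 for a, b in zip(odd, odd[1:])]
--     m = 2 - (n & 1)
--     palin = diffs + [odd[-1] // m] * m + diffs[::-1]
--     # Sweep once over the used prefix, maintaining the sums of all
--     # subarrays ENDING at the current position; collect them all.
--     sums = []
--     ending = []
--     for x in palin[:max(n, 0)]:
--         ending = [s + x for s in ending] + [x]
--         sums += ending
--     sums.sort(reverse=True)
--     return sums
-- ===== Notes on version B (the rewrite author's own statement) =====
-- stated objective: alternative
-- what changed: B builds the palindrome from zipped pairwise differences and collects all subarray sums in a single left-to-right sweep that maintains the list of sums of subarrays ending at the current position (transposing A's start-index outer loop with its running accumulator), then sorts descending.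
import Mathlib
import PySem

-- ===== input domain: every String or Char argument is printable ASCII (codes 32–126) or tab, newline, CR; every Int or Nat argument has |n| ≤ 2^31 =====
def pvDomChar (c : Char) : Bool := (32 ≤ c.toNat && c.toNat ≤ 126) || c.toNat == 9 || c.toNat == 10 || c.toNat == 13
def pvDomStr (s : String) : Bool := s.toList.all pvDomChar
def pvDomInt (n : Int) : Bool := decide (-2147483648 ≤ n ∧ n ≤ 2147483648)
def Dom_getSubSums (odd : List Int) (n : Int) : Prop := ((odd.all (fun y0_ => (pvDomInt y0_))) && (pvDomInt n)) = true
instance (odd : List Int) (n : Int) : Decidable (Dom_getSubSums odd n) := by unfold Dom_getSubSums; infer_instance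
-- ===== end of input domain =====

-- B collects subarray sums in one sweep over ending positions instead of A's start-index loops; same cost, alternative algorithm.

-- ===== PORT A =====
-- getPalin: 'n & 1' is floor-mod 2 (Int.emod with positive modulus, exact);
-- 'pref[::-1]' is List.reverse (PySem.List.slice?_none_none_neg_one); odd[-1] raises IndexError on [] — excluded by Pre_.
def getPalin (odd : List Int) (n : Int) : List Int :=
  let pref := (PySem.List.pyRange 1 (PySem.List.len odd)).map (fun i =>
      PySem.Int.floordiv (PySem.List.pyGetD odd (i - 1) 0 - PySem.List.pyGetD odd i 0) 2)
  pref ++ List.replicate (2 - n.emod 2).toNat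
            (PySem.Int.floordiv (PySem.List.pyGetD odd (-1) 0) (2 - n.emod 2))
       ++ pref.reverse

def getSubSums (odd : List Int) (n : Int) : List Int :=
  let palin := getPalin odd n
  let sums := (PySem.List.pyRange 0 n).foldl (fun sums i =>
    ((PySem.List.pyRange i n).foldl
        (fun (p : Int × List Int) j =>
          let s := p.1 + PySem.List.pyGetD palin j 0  -- palin[j]: IndexError (j ≥ len) excluded by Pre_
          (s, p.2 ++ [s]))
        (0, sums)).2) []
  PySem.List.sorted sums (fun x => x) true

-- ===== PORT B =====
def getSubSums_alt (odd : List Int) (n : Int) : List Int :=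
  let diffs := (odd.zip (odd.drop 1)).map (fun p => PySem.Int.floordiv (p.1 - p.2) 2)
  let m := 2 - n.emod 2
  let palin := diffs ++ List.replicate m.toNat (PySem.Int.floordiv (PySem.List.pyGetD odd (-1) 0) m) ++ diffs.reverse
  let sums := ((PySem.List.slice palin none (some (max n 0))).foldl
      (fun (p : List Int × List Int) (x : Int) =>
        let ending := p.2.map (fun s => s + x) ++ [x]
        (p.1 ++ ending, ending)) ([], [])).1
  PySem.List.sorted sums (fun x => x) true

-- ===== PRECONDITION & SPEC =====
-- A raises IndexError when odd is empty (odd[-1]) or when n exceeds the palindrome's length; exactly those inputs are excluded.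
def Pre_getSubSums (odd : List Int) (n : Int) : Prop :=
  odd ≠ [] ∧ n ≤ 2 * ((odd.length : Int) - 1) + (2 - n.emod 2)
instance (odd : List Int) (n : Int) : Decidable (Pre_getSubSums odd n) := by unfold Pre_getSubSums; infer_instance
def pvWitness_getSubSums : List Int × Int := ([1, 5], 3)

def Spec_getSubSums (odd : List Int) (n : Int) (out : List Int) : Prop := out = getSubSums_alt odd n
instance (odd : List Int) (n : Int) (out : List Int) : Decidable (Spec_getSubSums odd n out) := by unfold Spec_getSubSums; infer_instance

-- ===== CLAIM (what is proved, stated in full; the proofs are below) =====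
def Claim_equal_getSubSums : Prop := ∀ (odd : List Int) (n : Int), Dom_getSubSums odd n → Pre_getSubSums odd n → Spec_getSubSums odd n (getSubSums odd n)

-- ===== LEMMAS AND PROOFS =====


-- Proof-only helpers: B's fold step and the two components of its state.
def pvStepB (p : List Int × List Int) (x : Int) : List Int × List Int :=
  let ending := p.2.map (fun s => s + x) ++ [x]
  (p.1 ++ ending, ending)

def pvGenB (q : List Int) : List Int := (q.foldl pvStepB ([], [])).1
def pvEndB (q : List Int) : List Int := (q.foldl pvStepB ([], [])).2

-- Canonical triangular list of all nonempty-subarray sums, rows by start index.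
def pvGenT (q : List Int) : List Int :=
  (List.range q.length).flatMap (fun i =>
    (List.range (q.length - i)).map (fun d => ((q.drop i).take (d+1)).sum))

-- The two pref comprehensions build the same list.
theorem pv_pref_eq (odd : List Int) :
    (PySem.List.pyRange 1 (PySem.List.len odd)).map (fun i =>
      PySem.Int.floordiv (PySem.List.pyGetD odd (i - 1) 0 - PySem.List.pyGetD odd i 0) 2)
    = (odd.zip (odd.drop 1)).map (fun p => PySem.Int.floordiv (p.1 - p.2) 2) := by
  rw [PySem.List.pyRange_one]
  simp only [PySem.List.len_eq]
  apply List.ext_getElem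
  · simp
  · intro k h1 h2
    have hk : k + 1 < odd.length := by simp at h2; omega
    simp only [List.getElem_map, List.getElem_range, List.getElem_zip, List.getElem_drop]
    have e1 : (1 + (k : Int) - 1) = ((k : Nat) : Int) := by ring
    have e2 : (1 + (k : Int)) = ((k + 1 : Nat) : Int) := by push_cast; ring
    rw [e1, e2, PySem.List.pyGetD_natCast, PySem.List.pyGetD_natCast,
        List.getD_eq_getElem _ _ (show k < odd.length by omega), List.getD_eq_getElem _ _ hk]
    simp [Nat.add_comm]

theorem pv_palin_eq (odd : List Int) (n : Int) :
    getPalin odd n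
    = (odd.zip (odd.drop 1)).map (fun p => PySem.Int.floordiv (p.1 - p.2) 2)
      ++ List.replicate (2 - n.emod 2).toNat
           (PySem.Int.floordiv (PySem.List.pyGetD odd (-1) 0) (2 - n.emod 2))
      ++ ((odd.zip (odd.drop 1)).map (fun p => PySem.Int.floordiv (p.1 - p.2) 2)).reverse := by
  unfold getPalin; rw [pv_pref_eq]

theorem pv_len_palin (odd : List Int) (n : Int) (h : odd ≠ []) :
    ((getPalin odd n).length : Int) = 2 * ((odd.length : Int) - 1) + (2 - n.emod 2) := by
  unfold getPalin
  simp [PySem.List.pyRange_one, PySem.List.len_eq]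
  have h1 : 1 ≤ odd.length := List.length_pos_iff.mpr h
  have h2 : (0:Int) ≤ n.emod 2 := Int.emod_nonneg n (by norm_num)
  have h3 : n.emod 2 < 2 := Int.emod_lt_of_pos n (by norm_num)
  omega

-- Inner loop of A: running sums appended, characterized by take/drop.
theorem pv_innerA (q : List Int) (b : Int) (hb : b ≤ (q.length : Int)) :
    ∀ (c : Nat) (a : Int), 0 ≤ a → (b - a).toNat = c → ∀ (s : Int) (acc : List Int),
      (PySem.List.pyRange a b).foldl
        (fun (p : Int × List Int) j =>
          let s := p.1 + PySem.List.pyGetD q j 0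
          (s, p.2 ++ [s])) (s, acc)
      = (s + ((q.drop a.toNat).take c).sum,
         acc ++ (List.range c).map (fun d => s + ((q.drop a.toNat).take (d+1)).sum)) := by
  intro c
  induction c with
  | zero =>
    intro a ha hc s acc
    rw [PySem.List.pyRange_one_eq_nil (by omega)]
    simp
  | succ c ih =>
    intro a ha hc s acc
    rw [PySem.List.pyRange_one_cons (by omega)]
    simp only [List.foldl_cons]
    have hx : a.toNat < q.length := by omega
    have hget : PySem.List.pyGetD q a 0 = q[a.toNat] := PySem.List.pyGetD_eq_getElem q 0 ha (by exact_mod_cast by omega)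
    rw [hget, ih (a+1) (by omega) (by omega)]
    have h1 : (a+1).toNat = a.toNat + 1 := by omega
    have hdrop : q.drop a.toNat = q[a.toNat] :: q.drop (a.toNat+1) := List.drop_eq_getElem_cons hx
    rw [h1, List.range_succ_eq_map, hdrop]
    simp [List.map_map, Function.comp_def, add_assoc]
    refine ⟨?_, ?_, fun d hd => ?_⟩ <;>
      · rw [hdrop]
        simp only [List.take_succ_cons, List.take_zero, List.sum_cons, List.sum_nil]
        try ring

-- Outer loop of A: the triangle of rows, flattened.
theorem pv_outerA (q : List Int) (b : Int) (hb : b ≤ (q.length : Int)) :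
    ∀ (c : Nat) (a : Int), 0 ≤ a → (b - a).toNat = c → ∀ (acc : List Int),
      (PySem.List.pyRange a b).foldl (fun sums i =>
        ((PySem.List.pyRange i b).foldl
            (fun (p : Int × List Int) j =>
              let s := p.1 + PySem.List.pyGetD q j 0
              (s, p.2 ++ [s])) (0, sums)).2) acc
      = acc ++ (List.range c).flatMap (fun k =>
          (List.range (c - k)).map (fun d => ((q.drop (a.toNat + k)).take (d+1)).sum)) := by
  intro c
  induction c with
  | zero =>
    intro a ha hc acc
    rw [PySem.List.pyRange_one_eq_nil (by omega)]
    simp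
  | succ c ih =>
    intro a ha hc acc
    rw [PySem.List.pyRange_one_cons (by omega)]
    simp only [List.foldl_cons]
    rw [pv_innerA q b hb (c+1) a ha (by omega) 0 acc]
    rw [ih (a+1) (by omega) (by omega)]
    conv_rhs => rw [List.range_succ_eq_map, List.flatMap_cons, List.flatMap_map]
    have h1 : (a+1).toNat = a.toNat + 1 := by omega
    simp only [h1, List.append_assoc, Nat.sub_zero, Nat.add_zero, zero_add,
      Nat.succ_sub_succ, Nat.succ_eq_add_one]
    congr 2
    congr 1
    funext k
    simp [Nat.add_comm, Nat.add_left_comm]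

theorem pv_A_eq_genT (q : List Int) (n : Int) (hn : n ≤ (q.length : Int)) :
    (PySem.List.pyRange 0 n).foldl (fun sums i =>
        ((PySem.List.pyRange i n).foldl
            (fun (p : Int × List Int) j =>
              let s := p.1 + PySem.List.pyGetD q j 0
              (s, p.2 ++ [s])) (0, sums)).2) []
    = pvGenT (q.take n.toNat) := by
  rw [pv_outerA q n hn n.toNat 0 le_rfl (by omega) []]
  unfold pvGenT
  have hlen : (q.take n.toNat).length = n.toNat := by simp; omega
  rw [hlen, List.nil_append]
  simp only [List.flatMap_def]
  congr 1
  apply List.map_congr_left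
  intro k hk
  apply List.map_congr_left
  intro d hd
  simp only [List.mem_range] at hk hd
  rw [List.drop_take, List.take_take, min_eq_left (by omega), Int.toNat_zero, Nat.zero_add]

theorem pv_genB_append (q : List Int) (y : Int) :
    pvGenB (q ++ [y]) = pvGenB q ++ ((pvEndB q).map (fun s => s + y) ++ [y]) := by
  simp [pvGenB, pvEndB, List.foldl_append, pvStepB]

theorem pv_endB_append (q : List Int) (y : Int) :
    pvEndB (q ++ [y]) = (pvEndB q).map (fun s => s + y) ++ [y] := by
  simp [pvEndB, List.foldl_append, pvStepB]

theorem pv_endB_eq (q : List Int) :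
    pvEndB q = (List.range q.length).map (fun i => (q.drop i).sum) := by
  induction q using List.reverseRecOn with
  | nil => rfl
  | append_singleton q y ih =>
    rw [pv_endB_append, ih, List.length_append]
    simp only [List.length_cons, List.length_nil, Nat.zero_add]
    rw [List.range_succ, List.map_append, List.map_map]
    congr 1
    · apply List.map_congr_left
      intro i hi
      simp only [List.mem_range] at hi
      simp only [Function.comp_apply]
      rw [List.drop_append_of_le_length (by omega)]
      simp
    · simp

theorem pv_flatMap_snoc_perm {α β : Type} (l : List α) (f : α → List β) (g : α → β) :
    (l.flatMap (fun i => f i ++ [g i])).Perm (l.flatMap f ++ l.map g) := by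
  induction l with
  | nil => simp
  | cons x l ih =>
    simp only [List.flatMap_cons, List.map_cons]
    rw [List.append_assoc, List.append_assoc]
    exact List.Perm.append_left (f x) (((ih.cons (g x)).trans List.perm_middle.symm))

theorem pv_genT_snoc_perm (q : List Int) (y : Int) :
    (pvGenT (q ++ [y])).Perm
      (pvGenT q ++ ((List.range q.length).map (fun i => (q.drop i).sum + y) ++ [y])) := by
  have hstep : pvGenT (q ++ [y])
      = (List.range q.length).flatMap
          (fun i => (List.range (q.length - i)).map (fun d => ((q.drop i).take (d+1)).sum)
                    ++ [(q.drop i).sum + y])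
        ++ [y] := by
    unfold pvGenT
    rw [show (q ++ [y]).length = q.length + 1 by simp, List.range_succ, List.flatMap_append]
    congr 1
    · simp only [List.flatMap_def]
      congr 1
      apply List.map_congr_left
      intro i hi
      simp only [List.mem_range] at hi
      have hdrop : (q ++ [y]).drop i = q.drop i ++ [y] := List.drop_append_of_le_length (by omega)
      rw [hdrop, show q.length + 1 - i = (q.length - i) + 1 by omega, List.range_succ,
          List.map_append]
      congr 1
      · apply List.map_congr_left
        intro d hd
        simp only [List.mem_range] at hd
        rw [List.take_append_of_le_length (by simp; omega)]
      · have hlen : (q.drop i).length = q.length - i := by simp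
        simp only [List.map_cons, List.map_nil]
        rw [show q.length - i + 1 = (q.drop i).length + 1 by omega,
            List.take_of_length_le (by simp), List.sum_append]
        simp
    · have hdrop : (q ++ [y]).drop q.length = [y] := by
        rw [List.drop_append_of_le_length le_rfl, List.drop_length, List.nil_append]
      simp [hdrop]
  rw [hstep]
  unfold pvGenT
  rw [← List.append_assoc]
  exact (pv_flatMap_snoc_perm (List.range q.length) _ _).append_right [y]

theorem pv_perm_gen (q : List Int) : (pvGenT q).Perm (pvGenB q) := by
  induction q using List.reverseRecOn with
  | nil => simp [pvGenT, pvGenB]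
  | append_singleton q y ih =>
    refine (pv_genT_snoc_perm q y).trans ?_
    rw [pv_genB_append, pv_endB_eq, List.map_map]
    simp only [Function.comp_def]
    exact ih.append_right _

theorem pv_sorted_rev_congr (xs ys : List Int) (h : xs.Perm ys) :
    PySem.List.sorted xs (fun x => x) true = PySem.List.sorted ys (fun x => x) true := by
  apply PySem.List.eq_of_perm_of_pairwise_le_of_injective (fun x : Int => -x) neg_injective
  · exact ((PySem.List.sorted_perm xs _ true).trans h).trans (PySem.List.sorted_perm ys _ true).symm
  · exact (PySem.List.sorted_pairwise_rev xs (fun x => x)).imp (fun hab => by simpa using hab)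
  · exact (PySem.List.sorted_pairwise_rev ys (fun x => x)).imp (fun hab => by simpa using hab)


-- ===== VERDICT (by name: the statement is the Claim_ definition above) =====
theorem getSubSums_spec : Claim_equal_getSubSums := by
  intro odd n _ hpre
  unfold Spec_getSubSums getSubSums getSubSums_alt
  dsimp only
  rw [← pv_palin_eq odd n]
  have hlen := pv_len_palin odd n hpre.1
  have hn : n ≤ ((getPalin odd n).length : Int) := by
    rw [hlen]; exact hpre.2
  have hsl : PySem.List.slice (getPalin odd n) none (some (max n 0)) = (getPalin odd n).take n.toNat := by
    rw [PySem.List.slice_to _ (le_max_right n 0)]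
    congr 1; omega
  rw [hsl, pv_A_eq_genT _ n hn]
  exact pv_sorted_rev_congr _ _ (pv_perm_gen _)
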